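-- pv_equiv track=rewrite | github.com/elisemercury/Duplicate-Image-Finder | difPy/dif.py | _group_result_union
-- ===== SOURCE A (Python) =====
-- from collections import defaultdict
--
-- def _group_result_union(tuple_list):
--     # Function that formats the final result dict
--     result = defaultdict(list)
--     already_added = set()
--     for k, *v in tuple_list:
--         if v[0] not in already_added:
--             result[k].append(v)
--             already_added.add(v[0])
--     result = dict(result)
--     del already_added
--     return result
-- ===== SOURCE B (Python) =====
-- def _group_result_union(tuple_list):
--     # Pass 1: global first-seen dedup keyed on v[0], remembering the accepted (k, v) pairs.
--     seen = {}
--     for k, *v in tuple_list: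
--         if v[0] not in seen:
--             seen[v[0]] = (k, v)
--     # Pass 2: group the accepted pairs by k, preserving first-acceptance key order.
--     result = {}
--     for k, v in seen.values():
--         result.setdefault(k, []).append(v)
--     return result
-- ===== Notes on version B (the rewrite author's own statement) =====
-- stated objective: alternative
-- what changed: Replaces A's single accumulate-while-scanning loop (defaultdict plus a separate already_added set) by two passes: a first pass builds one dict keyed on v[0] that both performs the global first-seen dedup and stores the accepted (k, v) pairs, and a second pass groups those stored pairs by k with setdefault.
import Mathlib
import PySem

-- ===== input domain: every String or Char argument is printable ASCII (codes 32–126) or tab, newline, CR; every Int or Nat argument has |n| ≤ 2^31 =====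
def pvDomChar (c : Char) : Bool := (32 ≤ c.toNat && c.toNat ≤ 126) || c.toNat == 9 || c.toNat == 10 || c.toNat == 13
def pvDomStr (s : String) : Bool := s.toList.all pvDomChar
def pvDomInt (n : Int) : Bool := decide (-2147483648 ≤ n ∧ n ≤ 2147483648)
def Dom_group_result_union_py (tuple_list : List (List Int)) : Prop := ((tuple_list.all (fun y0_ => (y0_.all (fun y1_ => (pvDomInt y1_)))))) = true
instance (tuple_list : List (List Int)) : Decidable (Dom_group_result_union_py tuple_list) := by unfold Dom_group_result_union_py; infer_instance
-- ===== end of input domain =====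

-- B replaces the accumulate-while-scanning single loop by two passes: a dedup dict keyed on v[0]
-- holding the accepted (k, v) pairs, then a grouping pass over its values (objective: alternative).

-- ===== PORT A =====
-- single loop: defaultdict(list) result + already_added set; accept a tuple iff v[0] unseen
def group_result_union_py (tuple_list : List (List Int)) : List (Int × List (List Int)) :=
  let st := tuple_list.foldl (fun st t =>
    match t with
    | k :: v0 :: vrest =>
        let v := v0 :: vrest
        if PySem.Set.contains st.2 v0 then st
        else (st.1.modify k [] (· ++ [v]), PySem.Set.add st.2 v0)
    | _ => st  -- Python raises here (unpacking / v[0]); excluded by Pre_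
    ) ((PySem.Dict.empty : PySem.Dict Int (List (List Int))), (PySem.Set.empty : PySem.Set Int))
  st.1.items

-- ===== PORT B =====
-- pass 1: seen[v[0]] = (k, v) for the first tuple with that v[0]
-- pass 2: group seen.values() by k
def group_result_union_py_alt (tuple_list : List (List Int)) : List (Int × List (List Int)) :=
  let seen := tuple_list.foldl (fun seen t =>
    match t with
    | k :: v =>  -- k, *v unpack
        match v with
        | v0 :: _ => if seen.contains v0 then seen else seen.insert v0 (k, v)
        | [] => seen  -- Python raises on v[0]; excluded by Pre_
    | [] => seen  -- Python raises on unpacking; excluded by Pre_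
    ) (PySem.Dict.empty : PySem.Dict Int (Int × List Int))
  let result := seen.values.foldl
    (fun d p => d.insert p.1 (d.getD p.1 [] ++ [p.2]))
    (PySem.Dict.empty : PySem.Dict Int (List (List Int)))
  result.items

-- ===== PRECONDITION & SPEC =====
-- Pre_ excludes tuples of length < 2, on which Python A raises (ValueError on unpacking an
-- empty tuple, IndexError on v[0] for a length-1 tuple).
def Pre_group_result_union_py (tuple_list : List (List Int)) : Prop :=
  ∀ t ∈ tuple_list, 2 ≤ t.length
instance (tuple_list : List (List Int)) : Decidable (Pre_group_result_union_py tuple_list) := by unfold Pre_group_result_union_py; infer_instance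
def pvWitness_group_result_union_py : List (List Int) := [[1, 5, 7], [2, 5, 8], [1, 6, 9]]

def Spec_group_result_union_py (tuple_list : List (List Int)) (out : List (Int × List (List Int))) : Prop := out = group_result_union_py_alt tuple_list
instance (tuple_list : List (List Int)) (out : List (Int × List (List Int))) : Decidable (Spec_group_result_union_py tuple_list out) := by unfold Spec_group_result_union_py; infer_instance

-- ===== CLAIM (what is proved, stated in full; the proofs are below) =====
def Claim_equal_group_result_union_py : Prop := ∀ (tuple_list : List (List Int)), Dom_group_result_union_py tuple_list → Pre_group_result_union_py tuple_list → Spec_group_result_union_py tuple_list (group_result_union_py tuple_list)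

-- ===== LEMMAS AND PROOFS =====

-- B's grouping step, the common shape of A's per-tuple dict update and B's second pass
def pvGStep (d : PySem.Dict Int (List (List Int))) (p : Int × List Int) :
    PySem.Dict Int (List (List Int)) :=
  d.insert p.1 (d.getD p.1 [] ++ [p.2])

-- core invariant: running A's loop from a state mirroring `seen` mirrors B's loop result
lemma pv_invariant (l : List (List Int)) (hl : ∀ t ∈ l, 2 ≤ t.length)
    (seen : PySem.Dict Int (Int × List Int)) :
    l.foldl (fun st t =>
        match t with
        | k :: v0 :: vrest =>
            let v := v0 :: vrest
            if PySem.Set.contains st.2 v0 then st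
            else (st.1.modify k [] (· ++ [v]), PySem.Set.add st.2 v0)
        | _ => st)
      (seen.values.foldl pvGStep PySem.Dict.empty, (seen.keys : PySem.Set Int))
    =
    (((l.foldl (fun seen t =>
        match t with
        | k :: v =>
            match v with
            | v0 :: _ => if seen.contains v0 then seen else seen.insert v0 (k, v)
            | [] => seen
        | [] => seen) seen)).values.foldl pvGStep PySem.Dict.empty,
      ((l.foldl (fun seen t =>
        match t with
        | k :: v =>
            match v with
            | v0 :: _ => if seen.contains v0 then seen else seen.insert v0 (k, v)
            | [] => seen
        | [] => seen) seen)).keys) := by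
  induction l generalizing seen with
  | nil => rfl
  | cons t rest ih =>
    have ht : 2 ≤ t.length := hl t (by simp)
    have hrest : ∀ t ∈ rest, 2 ≤ t.length := fun t h => hl t (by simp [h])
    match t, ht with
    | k :: v0 :: vrest, _ =>
      simp only [List.foldl_cons]
      have hbr : PySem.Set.contains seen.keys v0 = seen.contains v0 := by
        simp [PySem.Set.contains, PySem.Dict.contains_eq_decide_mem_keys]
      by_cases hc : seen.contains v0 = true
      · have hm : v0 ∈ seen.keys := by
          simpa [PySem.Dict.contains_eq_decide_mem_keys] using hc
        simpa [hbr, hc, hm] using ih hrest seen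
      · have hc' : seen.contains v0 = false := by simpa using hc
        have hv : (seen.insert v0 (k, v0 :: vrest)).values = seen.values ++ [(k, v0 :: vrest)] := by
          simp [PySem.Dict.values, PySem.Dict.items_insert_of_not_contains, hc']
        have hk : (seen.insert v0 (k, v0 :: vrest)).keys = PySem.Set.add seen.keys v0 := by
          have h2 : v0 ∉ seen.keys := by
            simpa [PySem.Dict.contains_eq_decide_mem_keys] using hc'
          simp [PySem.Dict.keys_insert_of_not_contains, hc', PySem.Set.add, PySem.Set.contains, h2]
        have := ih hrest (seen.insert v0 (k, v0 :: vrest))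
        have hm : v0 ∉ seen.keys := by
          simpa [PySem.Dict.contains_eq_decide_mem_keys] using hc'
        rw [hv, List.foldl_append] at this
        simpa [hbr, hc', hm, hk, pvGStep, PySem.Dict.modify] using this

-- ===== VERDICT (by name: the statement is the Claim_ definition above) =====
theorem group_result_union_py_spec : Claim_equal_group_result_union_py := by
  intro tuple_list _hd hpre
  unfold Spec_group_result_union_py group_result_union_py group_result_union_py_alt
  exact congrArg (fun st => PySem.Dict.items st.1) (pv_invariant tuple_list hpre PySem.Dict.empty)
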